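-- pv_equiv track=rewrite | github.com/Jongil512/AlgoStudy | 230322/여행경로.py | solution
-- ===== SOURCE A (Python) =====
-- def solution(tickets):
--     answer = ['ICN']
--     nations = {x[0]:[] for x in tickets}
--     for ticket in tickets:
--         nations[ticket[0]].append(ticket[1])
--     for v in nations.values():
--         v.sort()
--     start = 'ICN'
--     def travle(s):
--         if s in nations.keys() and nations[s]:
--             nt = nations[s][0]
--             answer.append(nt)
--             nations[s].pop(0)
--             travle(nt)
--         else:
--             return
--     travle(start)
--     return answer
-- ===== SOURCE B (Python) =====
-- def solution(tickets):
--     remaining = [t for t in tickets]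
--     answer = ['ICN']
--     s = 'ICN'
--     while True:
--         outs = [t for t in remaining if t[0] == s]
--         if not outs:
--             return answer
--         best = min(outs, key=lambda t: t[1])
--         remaining.remove(best)
--         s = best[1]
--         answer.append(s)
-- ===== Notes on version B (the rewrite author's own statement) =====
-- stated objective: alternative
-- what changed: B drops A's dict of per-source pre-sorted queues consumed by tail recursion and instead keeps one flat list of unused tickets, each step selecting the outgoing ticket with the smallest destination by a min-scan and removing it.
import Mathlib
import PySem

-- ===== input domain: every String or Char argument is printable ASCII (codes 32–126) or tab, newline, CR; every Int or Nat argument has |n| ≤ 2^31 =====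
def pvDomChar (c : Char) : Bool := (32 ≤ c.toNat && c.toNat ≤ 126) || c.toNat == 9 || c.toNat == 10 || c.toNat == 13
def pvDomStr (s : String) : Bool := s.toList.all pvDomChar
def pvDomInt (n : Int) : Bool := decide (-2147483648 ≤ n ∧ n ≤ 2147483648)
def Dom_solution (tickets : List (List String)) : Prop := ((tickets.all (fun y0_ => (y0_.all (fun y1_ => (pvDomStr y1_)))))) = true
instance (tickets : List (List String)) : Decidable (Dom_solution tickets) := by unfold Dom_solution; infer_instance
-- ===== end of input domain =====

-- B replaces A's dict of per-source pre-sorted queues walked by tail recursion with a flat list of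
-- unused tickets scanned for the minimal-destination outgoing ticket at each step (objective: alternative).
-- Neither version mutates its argument.

-- shared accessors: t[0] / t[1] as pyGetD — exact on Pre_ (every ticket has length ≥ 2;
-- on shorter tickets Python raises IndexError, which Pre_ excludes)
def pvSrc (t : List String) : String := PySem.List.pyGetD t 0 ""
def pvDst (t : List String) : String := PySem.List.pyGetD t 1 ""

-- ===== PORT A =====
-- A's inner recursion 'travle'; fuel is only a totality guard (each call pops one ticket, so
-- tickets.length + 1 steps always suffice).
def pvTravleA (fuel : Nat) (nations : PySem.Dict String (List String)) (answer : List String)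
    (s : String) : List String :=
  match fuel with
  | 0 => answer
  | fuel + 1 =>
    if nations.contains s then              -- 'if s in nations.keys() and nations[s]:'
      match nations.getD s [] with
      | [] => answer
      | nt :: rest =>                       -- nt = nations[s][0]; nations[s].pop(0)
        pvTravleA fuel (nations.insert s rest) (answer ++ [nt]) nt
    else answer

def solution (tickets : List (List String)) : List String :=
  let nations : PySem.Dict String (List String) :=
    tickets.foldl (fun d x => d.insert (pvSrc x) []) PySem.Dict.empty
  let nations :=
    tickets.foldl (fun d t => d.modify (pvSrc t) [] (fun v => v ++ [pvDst t])) nations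
  -- 'for v in nations.values(): v.sort()'
  let nations : PySem.Dict String (List String) :=
    PySem.Dict.mk (nations.items.map (fun p => (p.1, PySem.List.sorted p.2 (fun x => x) false)))
  pvTravleA (tickets.length + 1) nations ["ICN"] "ICN"

-- ===== PORT B =====
-- B's while loop; same fuel guard.
def pvLoopB (fuel : Nat) (remaining : List (List String)) (answer : List String)
    (s : String) : List String :=
  match fuel with
  | 0 => answer
  | fuel + 1 =>
    let outs := remaining.filter (fun t => pvSrc t == s)
    if outs.isEmpty then answer             -- 'if not outs: return answer'
    else
      match PySem.List.min? outs (fun t => pvDst t) with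
      | none => answer                      -- unreachable: outs ≠ []
      | some best =>
        match PySem.List.remove? remaining best with
        | none => answer                    -- unreachable: best ∈ remaining
        | some r' => pvLoopB fuel r' (answer ++ [pvDst best]) (pvDst best)

def solution_alt (tickets : List (List String)) : List String :=
  -- 'remaining = [t for t in tickets]' is a copy; as a value it is tickets itself
  pvLoopB (tickets.length + 1) tickets ["ICN"] "ICN"

-- ===== PRECONDITION & SPEC =====
-- Pre_ excludes exactly the inputs where the Python A raises IndexError: some ticket of length < 2
-- (A reads x[0] and ticket[1] of every ticket while building its dict).
def Pre_solution (tickets : List (List String)) : Prop := ∀ t ∈ tickets, 2 ≤ t.length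
instance (tickets : List (List String)) : Decidable (Pre_solution tickets) := by
  unfold Pre_solution; infer_instance

def pvWitness_solution : List (List String) := [["ICN", "AAA"], ["AAA", "ICN"]]

def Spec_solution (tickets : List (List String)) (out : List String) : Prop := out = solution_alt tickets
instance (tickets : List (List String)) (out : List String) : Decidable (Spec_solution tickets out) := by unfold Spec_solution; infer_instance

-- ===== CLAIM (what is proved, stated in full; the proofs are below) =====
def Claim_equal_solution : Prop := ∀ (tickets : List (List String)), Dom_solution tickets → Pre_solution tickets → Spec_solution tickets (solution tickets)

-- ===== LEMMAS AND PROOFS =====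

-- the multiset of destinations of the unused tickets leaving c
def pvGrp (r : List (List String)) (c : String) : List String :=
  (r.filter (fun t => pvSrc t == c)).map pvDst

-- the loop invariant: A's dict holds, per source, exactly the sorted destinations of B's remaining tickets
def pvInv (d : PySem.Dict String (List String)) (r : List (List String)) : Prop :=
  ∀ c, d.getD c [] = PySem.List.sorted (pvGrp r c) (fun x => x) false

theorem pv_sorted_min_cons {l : List String} {m : String} (hm : m ∈ l) (hmin : ∀ y ∈ l, m ≤ y) :
    PySem.List.sorted l (fun x => x) false = m :: PySem.List.sorted (l.erase m) (fun x => x) false := by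
  apply PySem.List.eq_of_perm_of_pairwise_le_of_injective (fun x : String => x) (fun _ _ h => h)
  · exact (PySem.List.sorted_perm l _ false).trans
      ((List.perm_cons_erase hm).trans ((PySem.List.sorted_perm (l.erase m) _ false).symm.cons m))
  · exact PySem.List.sorted_pairwise l _
  · refine List.pairwise_cons.mpr ⟨?_, PySem.List.sorted_pairwise _ _⟩
    intro y hy
    exact hmin y (List.erase_subset ((PySem.List.sorted_perm (l.erase m) _ false).mem_iff.mp hy))

theorem pv_map_erase_perm {a : List String} {l : List (List String)} (ha : a ∈ l) :
    ((l.erase a).map pvDst).Perm ((l.map pvDst).erase (pvDst a)) := by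
  have h1 : (l.map pvDst).Perm (pvDst a :: (l.erase a).map pvDst) := by
    have := (List.perm_cons_erase ha).map pvDst
    simpa using this
  have h2 : (l.map pvDst).Perm (pvDst a :: (l.map pvDst).erase (pvDst a)) :=
    List.perm_cons_erase (List.mem_map_of_mem ha)
  exact (h1.symm.trans h2).cons_inv

-- the two walks agree step by step under the invariant
theorem pv_loop_eq (fuel : Nat) :
    ∀ (d : PySem.Dict String (List String)) (r : List (List String)) (ans : List String)
      (s : String), pvInv d r → pvTravleA fuel d ans s = pvLoopB fuel r ans s := by
  induction fuel with
  | zero => intro d r ans s _; rfl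
  | succ fuel ih =>
    intro d r ans s hinv
    have hd := hinv s
    by_cases hout : r.filter (fun t => pvSrc t == s) = []
    · -- no outgoing ticket: both sides stop with ans
      have hgrp : pvGrp r s = [] := by simp [pvGrp, hout]
      have hnil : d.getD s [] = [] := by
        rw [hd, hgrp]; exact (PySem.List.sorted_eq_nil_iff _ _ _).mpr rfl
      have hB : pvLoopB (fuel + 1) r ans s = ans := by
        simp [pvLoopB, hout]
      rw [hB]
      by_cases hc : d.contains s
      · simp [pvTravleA, hc, hnil]
      · simp [pvTravleA, hc]
    · -- there is an outgoing ticket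
      obtain ⟨best, hbest⟩ : ∃ b, PySem.List.min? (r.filter (fun t => pvSrc t == s))
          (fun t => pvDst t) = some b := by
        cases hmin : PySem.List.min? (r.filter (fun t => pvSrc t == s)) (fun t => pvDst t) with
        | none => exact absurd ((PySem.List.min?_eq_none_iff _ _).mp hmin) hout
        | some b => exact ⟨b, rfl⟩
      have hbmem : best ∈ r.filter (fun t => pvSrc t == s) := PySem.List.min?_mem hbest
      have hbr : best ∈ r := List.mem_of_mem_filter hbmem
      have hbsrc : pvSrc best = s := by simpa using List.of_mem_filter hbmem
      set m := pvDst best with hm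
      have hmmem : m ∈ pvGrp r s := List.mem_map_of_mem hbmem
      have hmmin : ∀ y ∈ pvGrp r s, m ≤ y := by
        intro y hy
        obtain ⟨t, ht, rfl⟩ := List.mem_map.mp hy
        exact PySem.List.min?_isMin hbest t ht
      have hsplit : PySem.List.sorted (pvGrp r s) (fun x => x) false
          = m :: PySem.List.sorted ((pvGrp r s).erase m) (fun x => x) false :=
        pv_sorted_min_cons hmmem hmmin
      have hgd : d.getD s [] = m :: PySem.List.sorted ((pvGrp r s).erase m) (fun x => x) false := by
        rw [hd, hsplit]
      have hc : d.contains s := by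
        by_contra hc
        have := PySem.Dict.getD_of_not_contains d ([] : List String) (by simpa using hc)
        rw [this] at hgd; exact List.cons_ne_nil _ _ hgd.symm
      -- A's step
      have hA : pvTravleA (fuel + 1) d ans s
          = pvTravleA fuel (d.insert s (PySem.List.sorted ((pvGrp r s).erase m) (fun x => x) false))
              (ans ++ [m]) m := by
        simp [pvTravleA, hc, hgd]
      -- B's step
      have hrem : PySem.List.remove? r best = some (r.erase best) :=
        PySem.List.remove?_eq_some_erase r best hbr
      have hB : pvLoopB (fuel + 1) r ans s = pvLoopB fuel (r.erase best) (ans ++ [m]) m := by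
        simp [pvLoopB, hout, hbest, hrem, hm]
      rw [hA, hB]
      apply ih
      -- the invariant is preserved
      intro c
      by_cases hcs : c = s
      · subst hcs
        rw [PySem.Dict.getD_insert, if_pos rfl]
        have hperm : (pvGrp (r.erase best) c).Perm ((pvGrp r c).erase m) := by
          have hfe : (r.erase best).filter (fun t => pvSrc t == c)
              = (r.filter (fun t => pvSrc t == c)).erase best := List.erase_filter.symm
          rw [pvGrp, hfe, hm]
          exact pv_map_erase_perm hbmem
        rw [(PySem.List.sorted_id_eq_sorted_id_iff_perm _ _).mpr hperm]
      · rw [PySem.Dict.getD_insert, if_neg hcs]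
        have hnm : best ∉ r.filter (fun t => pvSrc t == c) := by
          intro hmem
          exact hcs (Eq.symm (by simpa [hbsrc] using List.of_mem_filter hmem))
        have : pvGrp (r.erase best) c = pvGrp r c := by
          rw [pvGrp, ← List.erase_filter, List.erase_of_not_mem hnm]; rfl
        rw [hinv c, this]

-- value-mapped dict: get? commutes with mapping the values
theorem pv_get?_mapVal {κ ν ν' : Type} [BEq κ] (f : ν → ν') (items : List (κ × ν)) (c : κ) :
    (PySem.Dict.mk (items.map (fun p => (p.1, f p.2)))).get? c
      = ((PySem.Dict.mk items : PySem.Dict κ ν).get? c).map f := by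
  induction items with
  | nil => rfl
  | cons h t ih =>
    rw [List.map_cons, PySem.Dict.get?_mk_cons, PySem.Dict.get?_mk_cons]
    by_cases hh : (h.1 == c) = true
    · simp [hh]
    · simp only [hh, if_neg, Bool.false_eq_true, not_false_iff, ih]

-- the all-[] initial dict
theorem pv_getD_init (tickets : List (List String)) :
    ∀ (d : PySem.Dict String (List String)), (∀ c, d.getD c [] = []) →
      ∀ c, (tickets.foldl (fun d x => d.insert (pvSrc x) []) d).getD c [] = [] := by
  induction tickets with
  | nil => intro d hd c; exact hd c
  | cons h t ih =>
    intro d hd c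
    refine ih _ (fun c' => ?_) c
    rw [PySem.Dict.getD_insert]
    split_ifs with h1
    · rfl
    · exact hd c'

-- A's dict after construction satisfies the invariant with respect to the full ticket list
theorem pv_init_inv (tickets : List (List String)) :
    pvInv (PySem.Dict.mk ((tickets.foldl
        (fun d t => d.modify (pvSrc t) [] (fun v => v ++ [pvDst t]))
        (tickets.foldl (fun d x => d.insert (pvSrc x) []) PySem.Dict.empty)).items.map
          (fun p => (p.1, PySem.List.sorted p.2 (fun x => x) false)))) tickets := by
  intro c
  set d0 : PySem.Dict String (List String) :=
    tickets.foldl (fun d x => d.insert (pvSrc x) []) PySem.Dict.empty with hd0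
  set dapp : PySem.Dict String (List String) :=
    tickets.foldl (fun d t => d.modify (pvSrc t) [] (fun v => v ++ [pvDst t])) d0 with hdapp
  have happ : ∀ c', dapp.getD c' [] = pvGrp tickets c' := by
    intro c'
    have hfold : dapp = (tickets.map (fun t => (pvSrc t, pvDst t))).foldl
        (fun d p => d.modify p.1 [] (fun v => v ++ [p.2])) d0 := by
      rw [List.foldl_map]
    rw [hfold, PySem.Dict.getD_foldl_modify_append,
      pv_getD_init tickets PySem.Dict.empty (fun c'' => PySem.Dict.getD_empty c'' []) c',
      List.filter_map, List.map_map]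
    rfl
  have hmk : dapp = PySem.Dict.mk dapp.items := rfl
  cases hq : dapp.get? c with
  | none =>
    have h1 : (PySem.Dict.mk (dapp.items.map
        (fun p => (p.1, PySem.List.sorted p.2 (fun x => x) false)))).get? c = none := by
      rw [pv_get?_mapVal (fun v => PySem.List.sorted v (fun x => x) false) dapp.items c, ← hmk, hq]; rfl
    rw [PySem.Dict.getD_eq_get?_getD, h1]
    have h2 : pvGrp tickets c = [] := by
      rw [← happ c, PySem.Dict.getD_eq_get?_getD, hq]; rfl
    rw [h2]
    exact ((PySem.List.sorted_eq_nil_iff _ _ _).mpr rfl).symm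
  | some v =>
    have h1 : (PySem.Dict.mk (dapp.items.map
        (fun p => (p.1, PySem.List.sorted p.2 (fun x => x) false)))).get? c
        = some (PySem.List.sorted v (fun x => x) false) := by
      rw [pv_get?_mapVal (fun v => PySem.List.sorted v (fun x => x) false) dapp.items c, ← hmk, hq]; rfl
    rw [PySem.Dict.getD_eq_get?_getD, h1]
    have h2 : v = pvGrp tickets c := by
      have := PySem.Dict.getD_of_get?_eq_some dapp ([] : List String) hq
      rw [← this, happ c]
    rw [h2]; rfl

-- ===== VERDICT (by name: the statement is the Claim_ definition above) =====
theorem solution_spec : Claim_equal_solution := by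
  intro tickets _ _
  unfold Spec_solution solution solution_alt
  exact pv_loop_eq (tickets.length + 1) _ tickets ["ICN"] "ICN" (pv_init_inv tickets)
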